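-- pv_equiv track=rewrite | github.com/SomilKSharma/AdvancedDSA | Queues/123.py | solve
-- ===== SOURCE A (Python) =====
-- from collections import deque
--
-- def solve(A):
--
--     #create a queue
--     queue=deque()
--     #add the first three digits
--     queue.append('1')
--     queue.append('2')
--     queue.append('3')
--
--     #get an value variable
--     value=''
--     #get an answer array
--     answer=[]
--     for _ in range(A):
--         #get the value
--         value=queue.popleft()
--         answer.append(value)
--         #add the values of value back into the queue
--         queue.append(value+'1')
--         queue.append(value+'2')
--         queue.append(value+'3')
--
--     #return answer
--     return answer
-- ===== SOURCE B (Python) =====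
-- def solve(A):
--     answer = []
--     for n in range(1, A + 1):
--         s = ''
--         m = n
--         while m > 0:
--             m, r = divmod(m, 3)
--             if r == 0:
--                 r = 3
--                 m -= 1
--             s = str(r) + s
--         answer.append(s)
--     return answer
-- ===== Notes on version B (the rewrite author's own statement) =====
-- stated objective: alternative
-- what changed: Replaced the BFS queue with a direct per-index bijective-base-3 conversion (a divmod loop), computing each element independently from its position in the sequence instead of growing a frontier.
import Mathlib
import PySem

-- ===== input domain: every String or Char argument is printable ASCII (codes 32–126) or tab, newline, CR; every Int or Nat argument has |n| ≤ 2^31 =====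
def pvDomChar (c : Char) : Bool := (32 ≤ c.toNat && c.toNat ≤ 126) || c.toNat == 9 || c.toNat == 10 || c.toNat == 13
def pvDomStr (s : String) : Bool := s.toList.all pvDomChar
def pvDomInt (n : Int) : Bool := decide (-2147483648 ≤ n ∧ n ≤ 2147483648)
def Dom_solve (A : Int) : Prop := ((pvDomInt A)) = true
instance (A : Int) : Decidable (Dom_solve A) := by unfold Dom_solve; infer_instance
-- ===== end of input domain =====

-- B replaces A's BFS queue with a direct per-index bijective-base-3 conversion (alternative
-- decomposition; not claimed faster). Strings are ported as lists of characters (String.ofList at the end).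

-- ===== PORT A =====
-- the BFS loop: one iteration of `for _ in range(A)`: pop the front, append it to answer,
-- push its three children.  The `[]` queue case is unreachable (the queue only grows); Python
-- would raise there, the port returns the answer so far.
def solveLoop : Nat → List (List Char) → List (List Char) → List (List Char)
  | 0, _, ans => ans
  | _ + 1, [], ans => ans
  | k + 1, v :: rest, ans =>
      solveLoop k (rest ++ [v ++ ['1'], v ++ ['2'], v ++ ['3']]) (ans ++ [v])

def solve (A : Int) : List String :=
  (solveLoop A.toNat [['1'], ['2'], ['3']] []).map String.ofList

-- ===== PORT B =====
-- Source B's inner while-loop, as recursion on n: n, r = divmod(n, 3); if r == 0: r = 3; n -= 1;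
-- s = str(r) + s.  Prepending while looping down equals appending on the way up the recursion.
def conv (n : Nat) : List Char :=
  if n = 0 then []
  else
    let m := n / 3
    let r := n % 3
    if r = 0 then conv (m - 1) ++ ['3']
    else conv m ++ PySem.Int.toChars (Int.ofNat r)
termination_by n
decreasing_by all_goals omega

def solve_alt (A : Int) : List String :=
  (PySem.List.pyRange 1 (A + 1) 1).map (fun n => String.ofList (conv n.toNat))

-- ===== PRECONDITION & SPEC =====
def Spec_solve (A : Int) (out : List String) : Prop := out = solve_alt A
instance (A : Int) (out : List String) : Decidable (Spec_solve A out) := by unfold Spec_solve; infer_instance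

-- ===== CLAIM (what is proved, stated in full; the proofs are below) =====
def Claim_equal_solve : Prop := ∀ (A : Int), Dom_solve A → Spec_solve A (solve A)

-- ===== LEMMAS AND PROOFS =====

lemma conv_zero : conv 0 = [] := by rw [conv]; simp

-- appending digit d ∈ {1,2,3} to the bijective-base-3 string of i gives the string of 3i+d
lemma conv_child1 (i : Nat) : conv (3 * i + 1) = conv i ++ ['1'] := by
  rw [conv]
  have h1 : (3 * i + 1) / 3 = i := by omega
  have h2 : (3 * i + 1) % 3 = 1 := by omega
  simp [h1, h2]
  decide

lemma conv_child2 (i : Nat) : conv (3 * i + 2) = conv i ++ ['2'] := by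
  rw [conv]
  have h1 : (3 * i + 2) / 3 = i := by omega
  have h2 : (3 * i + 2) % 3 = 2 := by omega
  simp [h1, h2]
  decide

lemma conv_child3 (i : Nat) : conv (3 * i + 3) = conv i ++ ['3'] := by
  rw [conv]
  have h1 : (3 * i + 3) / 3 = i + 1 := by omega
  have h2 : (3 * i + 3) % 3 = 0 := by omega
  simp [h1, h2]

-- BFS invariant: when the queue holds the conversions of i, i+1, …, 3i, the next k pops
-- deliver the conversions of i, …, i+k-1.
lemma loop_inv (k : Nat) : ∀ (i : Nat) (ans : List (List Char)),
    solveLoop k ((List.range' i (2 * i + 1)).map conv) ans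
      = ans ++ (List.range' i k).map conv := by
  induction k with
  | zero => intro i ans; simp [solveLoop]
  | succ k ih =>
    intro i ans
    have hq : List.range' i (2 * i + 1) = i :: List.range' (i + 1) (2 * i) :=
      List.range'_succ ..
    rw [hq]
    simp only [List.map_cons, solveLoop]
    have hseg : List.range' (i + 1) (2 * i) ++ [3 * i + 1, 3 * i + 2, 3 * i + 3]
        = List.range' (i + 1) (2 * (i + 1) + 1) := by
      have h3 : List.range' (3 * i + 1) 3 = [3 * i + 1, 3 * i + 2, 3 * i + 3] := by
        simp [List.range']
      have := List.range'_append_1 (s := i + 1) (m := 2 * i) (n := 3)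
      have he : i + 1 + 2 * i = 3 * i + 1 := by omega
      have he2 : 2 * i + 3 = 2 * (i + 1) + 1 := by omega
      rw [he, h3, he2] at this
      exact this
    have hmap : (List.range' (i + 1) (2 * i)).map conv
          ++ [conv i ++ ['1'], conv i ++ ['2'], conv i ++ ['3']]
        = (List.range' (i + 1) (2 * (i + 1) + 1)).map conv := by
      rw [← hseg, List.map_append]
      simp [conv_child1, conv_child2, conv_child3]
    rw [hmap, ih (i + 1) (ans ++ [conv i])]
    rw [List.range'_succ]
    simp

lemma solve_eq (A : Int) : solve A = ((List.range' 1 A.toNat).map conv).map String.ofList := by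
  unfold solve
  have h0 : ([['1'], ['2'], ['3']] : List (List Char))
      = (List.range' 1 (2 * 1 + 1)).map conv := by
    have c1 := conv_child1 0
    have c2 := conv_child2 0
    have c3 := conv_child3 0
    simp [conv_zero] at c1 c2 c3
    simp [List.range', c1, c2, c3]
  rw [h0, loop_inv]
  simp

lemma pyRange_map (n : Nat) : ∀ (a : Int), 0 ≤ a →
    (PySem.List.pyRange a (a + n) 1).map (fun x => String.ofList (conv x.toNat))
      = (List.range' a.toNat n).map (fun j => String.ofList (conv j)) := by
  induction n with
  | zero =>
    intro a _
    rw [PySem.List.pyRange_one_eq_nil (by omega)]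
    simp
  | succ n ih =>
    intro a ha
    rw [PySem.List.pyRange_one_cons (by omega)]
    have he : a + (n + 1 : Nat) = (a + 1) + (n : Nat) := by push_cast; ring
    rw [he]
    simp only [List.map_cons, ih (a + 1) (by omega)]
    have ht : (a + 1).toNat = a.toNat + 1 := by omega
    rw [ht, List.range'_succ]
    simp

-- ===== VERDICT (by name: the statement is the Claim_ definition above) =====
theorem solve_spec : Claim_equal_solve := by
  intro A _
  unfold Spec_solve solve_alt
  rw [solve_eq]
  by_cases hA : 0 ≤ A
  · have he : A + 1 = (1 : Int) + (A.toNat : Nat) := by omega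
    rw [he, pyRange_map A.toNat 1 (by omega)]
    simp
  · have h1 : A.toNat = 0 := by omega
    rw [h1, PySem.List.pyRange_one_eq_nil (by omega)]
    simp
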